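-- pv_equiv track=rewrite | github.com/codeforboston/police-data-trust | backend/scraper/websites/FiftyA/FiftyAIncidentParser.py | _get_witnesses
-- ===== SOURCE A (Python) =====
-- from typing import Optional
--
-- def _get_witnesses(details: list[str]) -> Optional[list[str]]:
--     witnesses: list[str] = []
--     add_flag = False
--     for detail in details:
--         if add_flag:
--             witnesses.append(detail)
--         if detail == "Witness Officers:":
--             add_flag = True
--     return witnesses
-- ===== SOURCE B (Python) =====
-- from typing import Optional
--
-- def _get_witnesses(details: list[str]) -> Optional[list[str]]:
--     if "Witness Officers:" in details:
--         i = details.index("Witness Officers:")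
--         return details[i + 1:]
--     return []
-- ===== Notes on version B (the rewrite author's own statement) =====
-- stated objective: simpler
-- what changed: Replaces the flag-controlled per-element append loop with locate-then-slice: find the first marker with list.index and return the slice after it.
import Mathlib
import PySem

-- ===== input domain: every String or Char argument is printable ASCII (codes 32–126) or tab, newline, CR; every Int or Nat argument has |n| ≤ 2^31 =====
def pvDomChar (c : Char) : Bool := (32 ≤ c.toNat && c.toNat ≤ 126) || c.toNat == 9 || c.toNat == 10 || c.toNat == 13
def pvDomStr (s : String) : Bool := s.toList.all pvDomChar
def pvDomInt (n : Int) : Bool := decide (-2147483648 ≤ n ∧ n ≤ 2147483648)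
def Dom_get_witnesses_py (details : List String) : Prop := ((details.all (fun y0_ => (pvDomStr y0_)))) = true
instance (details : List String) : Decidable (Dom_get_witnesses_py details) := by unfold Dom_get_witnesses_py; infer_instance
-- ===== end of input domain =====

-- B replaces A's flag-controlled append loop with locate-then-slice (simpler decomposition).

-- ===== PORT A =====
-- loop state: (witnesses, add_flag)
def get_witnesses_py (details : List String) : Option (List String) :=
  let st := details.foldl
    (fun (st : List String × Bool) detail =>
      let witnesses := if st.2 then st.1 ++ [detail] else st.1
      let add_flag := if detail == "Witness Officers:" then true else st.2
      (witnesses, add_flag))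
    ([], false)
  some st.1

-- ===== PORT B =====
def get_witnesses_py_alt (details : List String) : Option (List String) :=
  match PySem.List.index? details "Witness Officers:" with
  | some i => some (PySem.List.slice details (some ((i : Int) + 1)) none)   -- details[i+1:], i ≥ 0
  | none => some []

-- ===== PRECONDITION & SPEC =====
def Spec_get_witnesses_py (details : List String) (out : Option (List String)) : Prop := out = get_witnesses_py_alt details
instance (details : List String) (out : Option (List String)) : Decidable (Spec_get_witnesses_py details out) := by unfold Spec_get_witnesses_py; infer_instance

-- ===== CLAIM (what is proved, stated in full; the proofs are below) =====
def Claim_equal_get_witnesses_py : Prop := ∀ (details : List String), Dom_get_witnesses_py details → Spec_get_witnesses_py details (get_witnesses_py details)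

-- ===== LEMMAS AND PROOFS =====

-- once the flag is true the loop appends every remaining element
-- (stated in the simp-normal form of A's loop body)
theorem pv_foldl_flag_true (l : List String) : ∀ (w : List String),
    List.foldl
      (fun (st : List String × Bool) detail =>
        (if st.2 = true then st.1 ++ [detail] else st.1,
         decide (detail = "Witness Officers:") || st.2))
      (w, true) l = (w ++ l, true) := by
  induction l with
  | nil => simp
  | cons d t ih =>
    intro w
    simp only [List.foldl_cons]
    simp [ih]

theorem pv_main (details : List String) :
    get_witnesses_py details = get_witnesses_py_alt details := by
  induction details with
  | nil => rfl
  | cons d t ih =>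
    by_cases hd : d = "Witness Officers:"
    · subst hd
      have hA : get_witnesses_py ("Witness Officers:" :: t) = some t := by
        simp [get_witnesses_py, pv_foldl_flag_true]
      have hB : get_witnesses_py_alt ("Witness Officers:" :: t) = some t := by
        unfold get_witnesses_py_alt
        rw [PySem.List.index?_cons_self]
        show some (PySem.List.slice ("Witness Officers:" :: t) (some (((0 : Nat) : Int) + 1)) none) = some t
        have e : ((0 : Nat) : Int) + 1 = ((1 : Nat) : Int) := by norm_num
        rw [e, PySem.List.slice_from_natCast]
        simp
      rw [hA, hB]
    · have h1 : PySem.List.index? (d :: t) "Witness Officers:" =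
          (PySem.List.index? t "Witness Officers:").map (· + 1) :=
        PySem.List.index?_cons_of_ne t hd
      unfold get_witnesses_py get_witnesses_py_alt at *
      rw [h1]
      cases hidx : PySem.List.index? t "Witness Officers:" with
      | none =>
        rw [hidx] at ih
        simpa [hd] using ih
      | some i =>
        rw [hidx] at ih
        simp only [Option.map_some] at *
        have hsl : PySem.List.slice (d :: t) (some ((i + 1 : Nat) + 1)) none
            = PySem.List.slice t (some ((i : Int) + 1)) none := by
          have e1 : ((i + 1 : Nat) : Int) + 1 = ((i + 2 : Nat) : Int) := by push_cast; ring
          have e2 : ((i : Int) + 1) = ((i + 1 : Nat) : Int) := by push_cast; ring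
          rw [e1, e2, PySem.List.slice_from_natCast, PySem.List.slice_from_natCast]
          rfl
        push_cast at hsl
        simpa [hd, hsl] using ih

-- ===== VERDICT (by name: the statement is the Claim_ definition above) =====
theorem get_witnesses_py_spec : Claim_equal_get_witnesses_py := by
  intro details _
  unfold Spec_get_witnesses_py
  exact pv_main details
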